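-- pv_equiv track=rewrite | github.com/CodingThrust/problem-reductions | docs/paper/verify-reductions/adversary_max_cut_optimal_linear_arrangement.py | adv_positional_cuts
-- ===== SOURCE A (Python) =====
-- def adv_positional_cuts(n: int, edges: list[tuple[int, int]], arrangement: list[int]) -> list[int]:
--     """
--     Compute positional cuts for an arrangement.
--     Returns list of n-1 cut sizes: c_i = edges crossing position i.
--     """
--     cuts = []
--     for cut_pos in range(n - 1):
--         c = 0
--         for u, v in edges:
--             fu, fv = arrangement[u], arrangement[v]
--             if (fu <= cut_pos) != (fv <= cut_pos):
--                 c += 1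
--         cuts.append(c)
--     return cuts
-- ===== SOURCE B (Python) =====
-- def adv_positional_cuts(n: int, edges: list[tuple[int, int]], arrangement: list[int]) -> list[int]:
--     """Difference array: each edge adds +1 on the clamped position range
--     [max(min(fu,fv),0), min(max(fu,fv),m)); a single prefix-sum pass yields the cuts."""
--     m = n - 1
--     if m <= 0:
--         return []
--     diff = [0] * (m + 1)
--     for u, v in edges:
--         fu, fv = arrangement[u], arrangement[v]
--         lo, hi = (fu, fv) if fu <= fv else (fv, fu)
--         start = max(lo, 0)
--         end = min(hi, m)
--         if start < end:
--             diff[start] += 1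
--             diff[end] -= 1
--     cuts = []
--     running = 0
--     for p in range(m):
--         running += diff[p]
--         cuts.append(running)
--     return cuts
-- ===== Notes on version B (the rewrite author's own statement) =====
-- stated objective: faster
-- what changed: Replaces the per-cut scan over all edges (position-major double loop) with a difference array: one pass over edges does a clamped range increment [max(min(fu,fv),0), min(max(fu,fv),n-1)) per edge, then one prefix-sum pass over the n-1 positions produces all cut sizes.
import Mathlib
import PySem

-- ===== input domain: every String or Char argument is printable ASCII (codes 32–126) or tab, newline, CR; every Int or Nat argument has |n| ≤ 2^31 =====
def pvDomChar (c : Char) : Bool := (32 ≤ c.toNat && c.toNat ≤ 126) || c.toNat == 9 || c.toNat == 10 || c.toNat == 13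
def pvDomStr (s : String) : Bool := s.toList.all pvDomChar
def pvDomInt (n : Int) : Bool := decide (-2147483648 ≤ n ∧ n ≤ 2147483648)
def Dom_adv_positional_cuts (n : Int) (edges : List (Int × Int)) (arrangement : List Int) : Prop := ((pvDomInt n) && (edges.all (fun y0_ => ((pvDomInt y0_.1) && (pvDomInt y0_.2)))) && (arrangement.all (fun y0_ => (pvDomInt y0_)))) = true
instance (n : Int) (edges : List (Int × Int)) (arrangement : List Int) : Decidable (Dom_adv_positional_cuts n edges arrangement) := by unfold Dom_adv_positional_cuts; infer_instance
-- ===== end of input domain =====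

-- B replaces A's position-major double loop by a difference array (per-edge clamped
-- range increment, then one prefix-sum pass); the RETURN values are proved equal on
-- every input where the Python A returns (Pre_ excludes out-of-range edge indices).

-- ===== PORT A =====
-- arrangement[u] is ported as pyGetD (default 0): Pre_ excludes the out-of-range
-- indices on which Python raises IndexError, so the default is never relied upon.
def adv_positional_cuts (n : Int) (edges : List (Int × Int)) (arrangement : List Int) : List Int :=
  (PySem.List.pyRange 0 (n - 1) 1).foldl
    (fun cuts cut_pos =>
      cuts ++ [edges.foldl
        (fun c e =>
          if (decide (PySem.List.pyGetD arrangement e.1 0 ≤ cut_pos)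
              != decide (PySem.List.pyGetD arrangement e.2 0 ≤ cut_pos)) = true
          then c + 1 else c) 0])
    []

-- ===== PORT B =====
-- B-side helper: Source B's clamped range increment on the diff array
-- (diff[max(lo,0)] += 1; diff[min(hi,m)] -= 1, only when the clamped range is nonempty).
def pvRangeAdd (m : Int) (diff : List Int) (lo hi : Int) : List Int :=
  if max lo 0 < min hi m then
    PySem.List.pySetD
      (PySem.List.pySetD diff (max lo 0) (PySem.List.pyGetD diff (max lo 0) 0 + 1))
      (min hi m)
      (PySem.List.pyGetD
        (PySem.List.pySetD diff (max lo 0) (PySem.List.pyGetD diff (max lo 0) 0 + 1))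
        (min hi m) 0 - 1)
  else diff

-- B-side helper: the body of Source B's edge loop (lo, hi = sorted endpoint positions).
def pvStepB (arrangement : List Int) (m : Int) (diff : List Int) (e : Int × Int) : List Int :=
  if PySem.List.pyGetD arrangement e.1 0 ≤ PySem.List.pyGetD arrangement e.2 0 then
    pvRangeAdd m diff (PySem.List.pyGetD arrangement e.1 0) (PySem.List.pyGetD arrangement e.2 0)
  else
    pvRangeAdd m diff (PySem.List.pyGetD arrangement e.2 0) (PySem.List.pyGetD arrangement e.1 0)

-- B-side helper: the body of Source B's prefix-sum loop (state = (cuts, running)).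
def pvScanStepB (diff : List Int) (st : List Int × Int) (p : Int) : List Int × Int :=
  (st.1 ++ [st.2 + PySem.List.pyGetD diff p 0], st.2 + PySem.List.pyGetD diff p 0)

def adv_positional_cuts_alt (n : Int) (edges : List (Int × Int)) (arrangement : List Int) : List Int :=
  if n - 1 ≤ 0 then []
  else
    ((PySem.List.pyRange 0 (n - 1) 1).foldl
      (pvScanStepB (edges.foldl (pvStepB arrangement (n - 1)) (List.replicate ((n - 1) + 1).toNat 0)))
      (([], 0) : List Int × Int)).1

-- ===== PRECONDITION & SPEC =====
-- Pre_ excludes exactly the inputs on which Python A raises IndexError: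
-- when n > 1 the edge loop runs, so every edge endpoint must be a valid index.
def Pre_adv_positional_cuts (n : Int) (edges : List (Int × Int)) (arrangement : List Int) : Prop :=
  1 < n → ∀ e ∈ edges, PySem.Raise.InRange arrangement.length e.1 ∧ PySem.Raise.InRange arrangement.length e.2
instance (n : Int) (edges : List (Int × Int)) (arrangement : List Int) : Decidable (Pre_adv_positional_cuts n edges arrangement) := by unfold Pre_adv_positional_cuts; infer_instance

def pvWitness_adv_positional_cuts : Int × (List (Int × Int)) × List Int := (3, [(0, 1), (1, 2)], [0, 2, 1])

def Spec_adv_positional_cuts (n : Int) (edges : List (Int × Int)) (arrangement : List Int) (out : List Int) : Prop := out = adv_positional_cuts_alt n edges arrangement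
instance (n : Int) (edges : List (Int × Int)) (arrangement : List Int) (out : List Int) : Decidable (Spec_adv_positional_cuts n edges arrangement out) := by unfold Spec_adv_positional_cuts; infer_instance

-- ===== CLAIM (what is proved, stated in full; the proofs are below) =====
def Claim_equal_adv_positional_cuts : Prop := ∀ (n : Int) (edges : List (Int × Int)) (arrangement : List Int), Dom_adv_positional_cuts n edges arrangement → Pre_adv_positional_cuts n edges arrangement → Spec_adv_positional_cuts n edges arrangement (adv_positional_cuts n edges arrangement)

-- ===== LEMMAS AND PROOFS =====

-- A's inner-loop predicate: the edge e crosses cut position p.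
def pvPred (arrangement : List Int) (p : Int) (e : Int × Int) : Bool :=
  decide (PySem.List.pyGetD arrangement e.1 0 ≤ p) != decide (PySem.List.pyGetD arrangement e.2 0 ≤ p)

-- A's output is the per-position crossing count, as a map over the cut positions.
theorem pvA_shape (n : Int) (edges : List (Int × Int)) (arrangement : List Int) :
    adv_positional_cuts n edges arrangement
      = (PySem.List.pyRange 0 (n - 1) 1).map (fun p => (edges.countP (pvPred arrangement p) : Int)) := by
  unfold adv_positional_cuts
  rw [PySem.List.foldl_append_singleton_eq_map
    (fun p => edges.foldl
        (fun c e =>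
          if (decide (PySem.List.pyGetD arrangement e.1 0 ≤ p)
              != decide (PySem.List.pyGetD arrangement e.2 0 ≤ p)) = true
          then c + 1 else c) 0)]
  simp only [List.nil_append]
  refine List.map_congr_left (fun p _ => ?_)
  have hfun : (fun (c : Int) (e : Int × Int) =>
        if (decide (PySem.List.pyGetD arrangement e.1 0 ≤ p)
            != decide (PySem.List.pyGetD arrangement e.2 0 ≤ p)) = true
        then c + 1 else c)
      = (fun (c : Int) (e : Int × Int) => if pvPred arrangement p e = true then c + 1 else c) := rfl
  rw [hfun, PySem.List.foldl_count_if (pvPred arrangement p) edges 0]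
  simp

-- Sum of a prefix after a single in-range set.
theorem pvSumTakeSet (d : List Int) (i k : Nat) (v : Int) (hi : i < d.length) :
    ((d.set i v).take k).sum = (d.take k).sum + (if i < k then v - d.getD i 0 else 0) := by
  rw [List.getD_eq_getElem _ _ hi, List.take_set, List.sum_set']
  by_cases h : i < k
  · have hlen : i < (d.take k).length := by
      simp only [List.length_take]; omega
    rw [dif_pos hlen, List.getElem_take]
    simp [h]; ring
  · have hlen : ¬ i < (d.take k).length := by
      simp only [List.length_take]; omega
    rw [dif_neg hlen]
    simp [h]

-- The range increment preserves the length of the diff array.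
theorem pvRangeAdd_length (m : Int) (diff : List Int) (lo hi : Int) :
    (pvRangeAdd m diff lo hi).length = diff.length := by
  unfold pvRangeAdd
  split
  · simp [PySem.List.length_pySetD]
  · rfl

-- One edge step preserves the length of the diff array.
theorem pvStepB_len1 (arrangement : List Int) (m : Int) (diff : List Int) (e : Int × Int) :
    (pvStepB arrangement m diff e).length = diff.length := by
  unfold pvStepB
  split <;> rw [pvRangeAdd_length]

-- The whole edge loop preserves the length of the diff array.
theorem pvFold_length (arrangement : List Int) (m : Int) :
    ∀ (es : List (Int × Int)) (d : List Int),
      (es.foldl (pvStepB arrangement m) d).length = d.length := by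
  intro es
  induction es with
  | nil => intro d; rfl
  | cons e es ih => intro d; rw [List.foldl_cons, ih, pvStepB_len1]

-- Prefix sums of one clamped range increment: +1 exactly on the positions lo ≤ p < hi.
theorem pvRangeAddSum (m p lo hi : Int) (d : List Int) (hd : d.length = (m + 1).toNat)
    (hp0 : 0 ≤ p) (hpm : p < m) :
    ((pvRangeAdd m d lo hi).take (p.toNat + 1)).sum
      = (d.take (p.toNat + 1)).sum + (if lo ≤ p ∧ p < hi then 1 else 0) := by
  unfold pvRangeAdd
  by_cases hcr : max lo 0 < min hi m
  · rw [if_pos hcr]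
    have h0s : (0:Int) ≤ max lo 0 := le_max_right _ _
    have h0t : (0:Int) ≤ min hi m := le_of_lt (lt_of_le_of_lt h0s hcr)
    have hsl : (max lo 0).toNat < d.length := by rw [hd]; omega
    have htl : (min hi m).toNat < d.length := by rw [hd]; omega
    have hne : (max lo 0).toNat ≠ (min hi m).toNat := by omega
    rw [PySem.List.pySetD_of_nonneg _ _ h0s, PySem.List.pyGetD_of_nonneg _ _ h0s,
        PySem.List.pySetD_of_nonneg _ _ h0t, PySem.List.pyGetD_of_nonneg _ _ h0t]
    have hread : (d.set (max lo 0).toNat (d.getD (max lo 0).toNat 0 + 1)).getD (min hi m).toNat 0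
        = d.getD (min hi m).toNat 0 := by
      simp [List.getD_eq_getElem?_getD, List.getElem?_set_ne hne]
    rw [hread, pvSumTakeSet _ _ _ _ (by simpa using htl), pvSumTakeSet _ _ _ _ hsl, hread]
    generalize (d.take (p.toNat + 1)).sum = S
    split_ifs <;> first | linarith | omega
  · rw [if_neg hcr]
    have hno : ¬ (lo ≤ p ∧ p < hi) := by omega
    simp [hno]

-- Prefix sums after one edge step gain A's crossing indicator for that edge.
theorem pvStepBSum (arrangement : List Int) (m p : Int) (hp0 : 0 ≤ p) (hpm : p < m)
    (d : List Int) (hd : d.length = (m + 1).toNat) (e : Int × Int) :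
    ((pvStepB arrangement m d e).take (p.toNat + 1)).sum
      = (d.take (p.toNat + 1)).sum + (if pvPred arrangement p e then 1 else 0) := by
  unfold pvStepB
  by_cases hle : PySem.List.pyGetD arrangement e.1 0 ≤ PySem.List.pyGetD arrangement e.2 0
  · rw [if_pos hle, pvRangeAddSum m p _ _ d hd hp0 hpm]
    congr 1
    by_cases h1 : PySem.List.pyGetD arrangement e.1 0 ≤ p <;>
      by_cases h2 : PySem.List.pyGetD arrangement e.2 0 ≤ p <;>
      simp [pvPred, h1, h2] <;> omega
  · rw [if_neg hle, pvRangeAddSum m p _ _ d hd hp0 hpm]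
    congr 1
    by_cases h1 : PySem.List.pyGetD arrangement e.1 0 ≤ p <;>
      by_cases h2 : PySem.List.pyGetD arrangement e.2 0 ≤ p <;>
      simp [pvPred, h1, h2] <;> omega

-- Key invariant: prefix sums of the diff array count the crossing edges.
theorem pvPrefix (arrangement : List Int) (m p : Int) (hp0 : 0 ≤ p) (hpm : p < m) :
    ∀ (es : List (Int × Int)) (d : List Int), d.length = (m + 1).toNat →
      ((es.foldl (pvStepB arrangement m) d).take (p.toNat + 1)).sum
        = ((d.take (p.toNat + 1)).sum) + (es.countP (pvPred arrangement p) : Int) := by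
  intro es
  induction es with
  | nil => intro d _; simp
  | cons e es ih =>
      intro d hd
      rw [List.foldl_cons, ih _ (by rw [pvStepB_len1, hd]),
        pvStepBSum arrangement m p hp0 hpm d hd e, List.countP_cons]
      by_cases hpe : pvPred arrangement p e
      · simp [hpe]; ring
      · simp [hpe]

-- The prefix-sum loop produces the prefix sums of the diff array, in order.
theorem pvScan (diff : List Int) (m : Int) (hlen : diff.length = (m + 1).toNat) :
    ∀ (k : Nat) (a : Int) (acc : List Int) (r : Int),
      a + k = m → 0 ≤ a → r = (diff.take a.toNat).sum →
      ((PySem.List.pyRange a m 1).foldl (pvScanStepB diff) (acc, r)).1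
        = acc ++ (PySem.List.pyRange a m 1).map (fun p => (diff.take (p.toNat + 1)).sum) := by
  intro k
  induction k with
  | zero =>
      intro a acc r hk _ _
      rw [PySem.List.pyRange_one_eq_nil (by omega)]
      simp
  | succ k ih =>
      intro a acc r hk ha hr
      have ham : a < m := by omega
      rw [PySem.List.pyRange_one_cons ham, List.foldl_cons, List.map_cons]
      have hal : a.toNat < diff.length := by rw [hlen]; omega
      have hget : PySem.List.pyGetD diff a 0 = diff[a.toNat] := by
        rw [PySem.List.pyGetD_of_nonneg _ _ ha, List.getD_eq_getElem _ _ hal]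
      have hr' : r + PySem.List.pyGetD diff a 0 = (diff.take (a.toNat + 1)).sum := by
        rw [hget, hr, List.sum_take_succ _ _ hal]
      have h1 : ((a + 1).toNat) = a.toNat + 1 := by omega
      calc ((PySem.List.pyRange (a + 1) m 1).foldl (pvScanStepB diff)
              (pvScanStepB diff (acc, r) a)).1
          = (acc ++ [(diff.take (a.toNat + 1)).sum])
              ++ (PySem.List.pyRange (a + 1) m 1).map (fun p => (diff.take (p.toNat + 1)).sum) := by
            have := ih (a + 1) (acc ++ [r + PySem.List.pyGetD diff a 0]) (r + PySem.List.pyGetD diff a 0)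
              (by omega) (by omega) (by rw [hr', h1])
            simpa [pvScanStepB, hr'] using this
        _ = acc ++ ((diff.take (a.toNat + 1)).sum
              :: (PySem.List.pyRange (a + 1) m 1).map (fun p => (diff.take (p.toNat + 1)).sum)) := by
            simp

-- ===== VERDICT (by name: the statement is the Claim_ definition above) =====
theorem adv_positional_cuts_spec : Claim_equal_adv_positional_cuts := by
  intro n edges arrangement _hdom _hpre
  unfold Spec_adv_positional_cuts
  rw [pvA_shape]
  unfold adv_positional_cuts_alt
  by_cases hm : n - 1 ≤ 0
  · rw [if_pos hm, PySem.List.pyRange_one_eq_nil (by omega)]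
    simp
  · rw [if_neg hm]
    have hlen : (edges.foldl (pvStepB arrangement (n - 1)) (List.replicate ((n - 1) + 1).toNat 0)).length
        = ((n - 1) + 1).toNat := by
      rw [pvFold_length]; simp
    rw [pvScan _ (n - 1) hlen (n - 1).toNat 0 [] 0 (by omega) le_rfl (by simp)]
    rw [List.nil_append]
    refine List.map_congr_left (fun p hp => ?_)
    obtain ⟨hp0, hpm⟩ := PySem.List.mem_pyRange_one.mp hp
    rw [pvPrefix arrangement (n - 1) p hp0 hpm edges _ (by simp)]
    simp [List.take_replicate]
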